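-- pv_equiv track=rewrite | github.com/gkze/nixcfg | overlays/goose-cli/patch_source.py | drop_top_level_sections
-- ===== SOURCE A (Python) =====
-- def drop_top_level_sections(text: str, headers: frozenset[str]) -> str:
--     """Drop TOML sections and child tables that cannot live inside ``vendor/``."""
--     child_prefixes = tuple(
--         header[:-1] + "."
--         for header in headers
--         if header.startswith("[")
--         and header.endswith("]")
--         and not header.startswith("[[")
--     )
--
--     def should_remove(header: str) -> bool:
--         return header in headers or any(
--             header.startswith(prefix) for prefix in child_prefixes
--         )
--
--     kept: list[str] = []
--     removing = False
--     for line in text.splitlines(keepends=True):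
--         stripped = line.strip()
--         if stripped.startswith("[") and stripped.endswith("]"):
--             removing = should_remove(stripped)
--             if removing:
--                 continue
--         if not removing:
--             kept.append(line)
--     return "".join(kept)
-- ===== SOURCE B (Python) =====
-- def drop_top_level_sections(text: str, headers: frozenset[str]) -> str:
--     """Drop TOML sections and child tables that cannot live inside ``vendor/``."""
--     child_prefixes = tuple(
--         header[:-1] + "."
--         for header in headers
--         if header.startswith("[")
--         and header.endswith("]")
--         and not header.startswith("[[")
--     )
--
--     def should_remove(header: str) -> bool:
--         return header in headers or any(
--             header.startswith(prefix) for prefix in child_prefixes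
--         )
--
--     # Walk the lines backwards: collect the body of the block being entered in
--     # `tail`; on reaching its header line decide the whole block's fate at once.
--     out: list[str] = []
--     tail: list[str] = []
--     for line in reversed(text.splitlines(keepends=True)):
--         stripped = line.strip()
--         if stripped.startswith("[") and stripped.endswith("]"):
--             if not should_remove(stripped):
--                 out = [line] + tail + out
--             tail = []
--         else:
--             tail = [line] + tail
--     # whatever is left in `tail` is the header-less preamble: always kept
--     return "".join(tail + out)
-- ===== Notes on version B (the rewrite author's own statement) =====
-- stated objective: alternative
-- what changed: B scans the lines backwards, buffering each block's body and deciding keep/drop for the whole block when its header line is reached, instead of A's forward scan with a persistent 'removing' flag.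
import Mathlib
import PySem

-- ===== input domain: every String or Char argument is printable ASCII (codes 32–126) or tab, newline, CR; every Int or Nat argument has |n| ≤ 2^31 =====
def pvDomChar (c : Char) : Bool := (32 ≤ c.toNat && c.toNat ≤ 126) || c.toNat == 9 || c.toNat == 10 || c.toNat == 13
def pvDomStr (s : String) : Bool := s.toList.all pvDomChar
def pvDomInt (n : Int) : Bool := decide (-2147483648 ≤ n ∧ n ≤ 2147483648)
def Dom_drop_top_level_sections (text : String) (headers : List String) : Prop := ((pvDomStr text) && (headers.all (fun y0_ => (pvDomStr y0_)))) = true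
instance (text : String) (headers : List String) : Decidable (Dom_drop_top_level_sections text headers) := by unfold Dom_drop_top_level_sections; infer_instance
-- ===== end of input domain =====

-- B replaces A's forward scan with a 'removing' flag by a backward scan that buffers each
-- block's body and decides the whole block's fate at its header line (alternative decomposition).

-- ===== PORT A =====
-- hand port of str.splitlines(keepends=True): exact on the stated domain, whose only
-- line-break characters are '\n', '\r' and the pair '\r\n' (used by both ports).
def pvSplitlinesKeep (cur : List Char) : List Char → List (List Char)
  | [] => if cur = [] then [] else [cur.reverse]
  | c :: rest =>
    if c = '\n' then (cur.reverse ++ ['\n']) :: pvSplitlinesKeep [] rest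
    else if c = '\r' then
      if rest.head? = some '\n' then (cur.reverse ++ ['\r', '\n']) :: pvSplitlinesKeep [] rest.tail
      else (cur.reverse ++ ['\r']) :: pvSplitlinesKeep [] rest
    else pvSplitlinesKeep (c :: cur) rest
termination_by l => l.length
decreasing_by all_goals simp [List.length_tail]

-- child_prefixes and should_remove, identical in A and B (B reuses A's predicate verbatim)
def pvChildPrefixes (headers : List String) : List (List Char) :=
  (headers.filter (fun h =>
      PySem.Str.startswith h "[" && PySem.Str.endswith h "]" && !PySem.Str.startswith h "[[")).map
    (fun h => PySem.Chars.slice h.toList none (some (-1)) ++ ['.'])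

def pvShouldRemove (headers : List String) (prefixes : List (List Char)) (h : List Char) : Bool :=
  (headers.map String.toList).contains h || prefixes.any (fun p => PySem.Chars.startswith h p)

-- A's for-loop: forward scan with the persistent `removing` flag
def pvGoA (rm : List Char → Bool) (removing : Bool) : List (List Char) → List (List Char)
  | [] => []
  | line :: rest =>
    let stripped := PySem.Chars.strip line
    if PySem.Chars.startswith stripped ['['] && PySem.Chars.endswith stripped [']'] then
      if rm stripped then pvGoA rm true rest
      else line :: pvGoA rm false rest
    else if removing then pvGoA rm removing rest
    else line :: pvGoA rm removing rest

def drop_top_level_sections (text : String) (headers : List String) : String :=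
  String.ofList (PySem.Chars.join []
    (pvGoA (pvShouldRemove headers (pvChildPrefixes headers)) false
      (pvSplitlinesKeep [] text.toList)))

-- ===== PORT B =====
-- B's backward scan: process the lines right-to-left; `tail` holds the body lines of the
-- block currently being entered, `out` the already-decided kept lines; at a header line the
-- whole buffered block is kept or dropped at once.  Returns (tail, out): the leftover
-- `tail` is the header-less preamble, always kept.
def pvGoB (rm : List Char → Bool) : List (List Char) → List (List Char) × List (List Char)
  | [] => ([], [])
  | line :: rest =>
    let p := pvGoB rm rest
    let stripped := PySem.Chars.strip line
    if PySem.Chars.startswith stripped ['['] && PySem.Chars.endswith stripped [']'] then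
      if rm stripped then ([], p.2)
      else ([], line :: (p.1 ++ p.2))
    else (line :: p.1, p.2)

def drop_top_level_sections_alt (text : String) (headers : List String) : String :=
  let p := pvGoB (pvShouldRemove headers (pvChildPrefixes headers))
      (pvSplitlinesKeep [] text.toList)
  String.ofList (PySem.Chars.join [] (p.1 ++ p.2))

-- ===== PRECONDITION & SPEC =====
def Spec_drop_top_level_sections (text : String) (headers : List String) (out : String) : Prop := out = drop_top_level_sections_alt text headers
instance (text : String) (headers : List String) (out : String) : Decidable (Spec_drop_top_level_sections text headers out) := by unfold Spec_drop_top_level_sections; infer_instance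

-- ===== CLAIM (what is proved, stated in full; the proofs are below) =====
def Claim_equal_drop_top_level_sections : Prop := ∀ (text : String) (headers : List String), Dom_drop_top_level_sections text headers → Spec_drop_top_level_sections text headers (drop_top_level_sections text headers)

-- ===== LEMMAS AND PROOFS =====

-- the invariant tying A's flag to B's two accumulators: with the flag off A keeps the
-- pending tail, with it on A drops exactly that tail.
theorem pvGoA_eq_pvGoB (rm : List Char → Bool) (lines : List (List Char)) :
    pvGoA rm true lines = (pvGoB rm lines).2 ∧
    pvGoA rm false lines = (pvGoB rm lines).1 ++ (pvGoB rm lines).2 := by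
  induction lines with
  | nil => simp [pvGoA, pvGoB]
  | cons line rest ih =>
    simp only [pvGoA, pvGoB]
    split_ifs with h1 h2 <;> simp_all [ih.1, ih.2]

-- ===== VERDICT (by name: the statement is the Claim_ definition above) =====
theorem drop_top_level_sections_spec : Claim_equal_drop_top_level_sections := by
  intro text headers _
  unfold Spec_drop_top_level_sections drop_top_level_sections drop_top_level_sections_alt
  rw [(pvGoA_eq_pvGoB _ _).2]
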